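-- pv_equiv track=rewrite | github.com/SJ0000/PS | Programmers/17687.py | solution
-- ===== SOURCE A (Python) =====
-- def num_to_char(n):
--     if n <= 9:
--         return str(n)
--     diff = n-10
--     return str(chr(ord('A')+diff))
--
-- def dec_to_string(dec, n):
--     if dec == 0:
--         return "0"
--
--     ret = []
--     a = dec
--     b = 0
--     while a > 0:
--         b = a % n
--         a //= n
--         ret.append(b)
--     ret.reverse()
--     ret = list(map(num_to_char, ret))
--     return ''.join(ret)
--
-- def solution(n, t, m, p):
--     words = []
--
--     # 총 문자 개수가 최소 t*m개 되도록 미리 만들어야 함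
--     created_count = 0
--     create_num = 0
--     while created_count < t*m:
--         created = dec_to_string(create_num, n)
--         words.append(created)
--         created_count += len(created)
--         create_num += 1
--
--     answer = []
--     count = 0
--     for (i, ch) in enumerate(''.join(words)):
--         if count == t:
--             break
--         if i % m == p-1:
--             answer.append(ch)
--             count += 1
--
--     return ''.join(answer)
-- ===== SOURCE B (Python) =====
-- def solution(n, t, m, p):
--     def digit_char(d):
--         if d <= 9:
--             return str(d)
--         return chr(ord('A') + d - 10)
--
--     def repr_rec(x):
--         if x < n:
--             return digit_char(x)
--         return repr_rec(x // n) + digit_char(x % n)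
--
--     def locate(pos):
--         # digit of the base-n Champernowne stream "0","1","2",... at index pos
--         if pos < n:
--             return digit_char(pos)
--         pos -= n
--         d = 2
--         block = (n * n - n) * 2
--         while pos >= block:
--             pos -= block
--             d += 1
--             block = (n ** d - n ** (d - 1)) * d
--         num = n ** (d - 1) + pos // d
--         return repr_rec(num)[pos % d]
--
--     if not (1 <= p <= m):
--         return ''  # no stream index is congruent to p-1 modulo m
--     return ''.join(locate(p - 1 + k * m) for k in range(t))
-- ===== Notes on version B (the rewrite author's own statement) =====
-- stated objective: faster
-- what changed: Instead of materialising every number 0,1,2,... in base n until t*m characters exist and then scanning the joined string with a counter, B answers each of the t queried positions directly: it skips whole blocks of equal-digit-count numbers with a digit-count formula (Champernowne-style indexing) and extracts the one digit of the one number that contains the position (returning '' up front when p is outside [1,m], where no index is congruent to p-1 mod m).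
-- outside the precondition, e.g. on solution(2, -2, -3, 0): A returns '11', B returns ''; on solution(-5, 1, 1, 1): A returns '0', B raises RecursionError; on solution(60000, 1, 55242, 1): A returns '0', B returns '0'
import Mathlib
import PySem

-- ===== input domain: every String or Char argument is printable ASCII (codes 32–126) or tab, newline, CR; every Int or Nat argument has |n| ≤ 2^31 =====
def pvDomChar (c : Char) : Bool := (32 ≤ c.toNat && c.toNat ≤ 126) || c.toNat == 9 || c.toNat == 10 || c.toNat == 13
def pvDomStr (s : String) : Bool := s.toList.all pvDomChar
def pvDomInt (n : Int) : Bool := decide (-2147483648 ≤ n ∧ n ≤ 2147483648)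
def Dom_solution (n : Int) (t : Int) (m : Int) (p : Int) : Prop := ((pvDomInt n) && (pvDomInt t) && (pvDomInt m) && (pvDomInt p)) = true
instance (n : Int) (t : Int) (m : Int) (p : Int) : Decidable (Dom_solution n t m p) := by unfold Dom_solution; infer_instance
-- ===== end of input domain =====

-- B answers each of the t queried stream positions directly by digit-count block
-- skipping (Champernowne-style indexing) instead of materialising and scanning
-- the whole t*m-character prefix; measurably faster on large inputs.


-- ===== PORT A =====

-- num_to_char
def numToChar (x : Int) : String :=
  if x ≤ 9 then PySem.Int.toStr x
  else String.ofList [Char.ofNat (65 + (x - 10)).toNat]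

-- the 'while a > 0' loop of dec_to_string (fuel only makes the recursion total;
-- with n ≥ 2 — Pre_ — it is never exhausted: a strictly decreases)
def decLoop (n : Int) (fuel : Nat) (a : Int) (ret : List Int) : List Int :=
  match fuel with
  | 0 => ret
  | fuel + 1 =>
    if 0 < a then decLoop n fuel (PySem.Int.floordiv a n) (ret ++ [PySem.Int.mod a n])
    else ret

-- dec_to_string
def decToString (dec : Int) (n : Int) : String :=
  if dec = 0 then "0"
  else PySem.Str.join "" (((decLoop n (dec.toNat + 1) dec []).reverse).map numToChar)

-- the 'while created_count < t*m' loop of solution (fuel: each iteration adds at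
-- least one character when n ≥ 2, so (t*m).toNat + 1 rounds always suffice)
def buildLoop (n t m : Int) (fuel : Nat) (cc : Int) (num : Int) (words : List String) : List String :=
  match fuel with
  | 0 => words
  | fuel + 1 =>
    if cc < t * m then
      let created := decToString num n
      buildLoop n t m fuel (cc + PySem.Str.len created) (num + 1) (words ++ [created])
    else words

-- the 'for (i, ch) in enumerate(...)' loop with its break
def scanLoop (t m p : Int) (chars : List Char) (i : Int) (count : Int) (answer : List Char) : List Char :=
  match chars with
  | [] => answer
  | c :: rest =>
    if count = t then answer
    else if PySem.Int.mod i m = p - 1 then scanLoop t m p rest (i + 1) (count + 1) (answer ++ [c])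
    else scanLoop t m p rest (i + 1) count answer

def solution (n : Int) (t : Int) (m : Int) (p : Int) : String :=
  let words := buildLoop n t m ((t * m).toNat + 1) 0 0 []
  let s := PySem.Str.join "" words
  String.ofList (scanLoop t m p s.toList 0 0 [])

-- ===== PORT B =====

-- digit_char
def digitChar (d : Int) : String :=
  if d ≤ 9 then PySem.Int.toStr d
  else String.ofList [Char.ofNat (65 + (d - 10)).toNat]

-- repr_rec (fuel only makes the recursion total; x.toNat + 1 always suffices for n ≥ 2)
def reprRec (n : Int) (fuel : Nat) (x : Int) : String :=
  match fuel with
  | 0 => ""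
  | fuel + 1 =>
    if x < n then digitChar x
    else reprRec n fuel (PySem.Int.floordiv x n) ++ digitChar (PySem.Int.mod x n)

-- the 'while pos >= block' loop of locate; the exponents d+1 and d are positive
-- throughout (d starts at 2), so .toNat is exact for Python's n ** (d-1)
def skipLoop (n : Int) (fuel : Nat) (pos : Int) (d : Int) (block : Int) : Int × Int × Int :=
  match fuel with
  | 0 => (pos, d, block)
  | fuel + 1 =>
    if block ≤ pos then
      skipLoop n fuel (pos - block) (d + 1) ((n ^ (d + 1).toNat - n ^ d.toNat) * (d + 1))
    else (pos, d, block)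

def locate (n : Int) (pos0 : Int) : String :=
  if pos0 < n then digitChar pos0
  else
    let r := skipLoop n ((pos0 - n).toNat + 1) (pos0 - n) 2 ((n * n - n) * 2)
    let pos := r.1
    let d := r.2.1
    let num := n ^ (d.toNat - 1) + PySem.Int.floordiv pos d
    -- repr_rec(num)[pos % d]: under Pre_ the index is always in range (none = IndexError)
    match PySem.Str.pyGet? (reprRec n (num.toNat + 1) num) (PySem.Int.mod pos d) with
    | some c => String.ofList [c]
    | none => ""

def solution_alt (n : Int) (t : Int) (m : Int) (p : Int) : String :=
  -- no stream index is congruent to p-1 modulo m when p is outside [1, m]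
  if 1 ≤ p ∧ p ≤ m then
    PySem.Str.join "" ((PySem.List.pyRange 0 t 1).map (fun k => locate n (p - 1 + k * m)))
  else ""

-- ===== PRECONDITION & SPEC =====

-- Pre_ excludes three kinds of inputs: those with t < 0 and m < 0 (so t*m > 0), where
-- A's picks at Python's negative residues i % m are an accident of the scan rather than
-- a p-th-column sample and B's natural guard returns ''; those with n < 2 while t*m > 0,
-- where A divides by zero, loops forever or returns strings of negative 'digits' on which
-- B's recursion raises RecursionError; and those with both n ≥ 55242 and t*m ≥ 55242,
-- where the string A returns can contain lone-surrogate characters (chr of 0xD800–0xDFFF),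
-- which are not values of Lean's String type (both Pythons return the same characters there).
def Pre_solution (n : Int) (t : Int) (m : Int) (p : Int) : Prop :=
  (t ≤ 0 ∧ 0 ≤ m) ∨ (0 ≤ t ∧ m ≤ 0) ∨ (2 ≤ n ∧ 1 ≤ m ∧ (n ≤ 55241 ∨ t * m ≤ 55241))
instance (n : Int) (t : Int) (m : Int) (p : Int) : Decidable (Pre_solution n t m p) := by
  unfold Pre_solution; infer_instance

def pvWitness_solution : Int × Int × Int × Int := (2, 3, 2, 1)

def Spec_solution (n : Int) (t : Int) (m : Int) (p : Int) (out : String) : Prop := out = solution_alt n t m p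
instance (n : Int) (t : Int) (m : Int) (p : Int) (out : String) : Decidable (Spec_solution n t m p out) := by unfold Spec_solution; infer_instance

-- ===== CLAIM (what is proved, stated in full; the proofs are below) =====
def Claim_equal_solution : Prop := ∀ (n : Int) (t : Int) (m : Int) (p : Int), Dom_solution n t m p → Pre_solution n t m p → Spec_solution n t m p (solution n t m p)

-- ===== LEMMAS AND PROOFS =====

-- The common mathematical model: the base-N Champernowne stream.
-- dchar v is the character both programs print for digit value v.
def dchar (v : Nat) : Char := if v ≤ 9 then Char.ofNat (48 + v) else Char.ofNat (55 + v)

-- reprN N x: the base-N rendering of x (big-endian), as both programs produce it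
def reprN (N x : Nat) : List Char :=
  if x = 0 then [dchar 0] else (Nat.digits N x).reverse.map dchar

def rlen (N x : Nat) : Nat := (reprN N x).length

-- the stream prefix made of the renderings of 0, 1, ..., K-1, and its length
def LJ (N K : Nat) : List Char := (List.range K).flatMap (reprN N)
def LenJ (N K : Nat) : Nat := (LJ N K).length

lemma reprN_ne_nil (N x : Nat) : reprN N x ≠ [] := by
  unfold reprN
  split
  · simp
  · next h => simp [Nat.digits_ne_nil_iff_ne_zero, h]

lemma rlen_pos (N x : Nat) : 1 ≤ rlen N x := by
  have h := reprN_ne_nil N x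
  unfold rlen
  exact List.length_pos_iff.mpr h

lemma LJ_succ (N K : Nat) : LJ N (K + 1) = LJ N K ++ reprN N K := by
  simp [LJ, List.range_succ]

lemma LenJ_succ (N K : Nat) : LenJ N (K + 1) = LenJ N K + rlen N K := by
  simp [LenJ, LJ_succ, rlen]

lemma LenJ_strict_mono {N K1 K2 : Nat} (h : K1 < K2) : LenJ N K1 < LenJ N K2 := by
  induction K2 with
  | zero => omega
  | succ K ih =>
    rw [LenJ_succ]
    have hr := rlen_pos N K
    rcases Nat.lt_succ_iff_lt_or_eq.mp h with h' | h'
    · have := ih h'; omega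
    · subst h'; omega

lemma LenJ_mono {N K1 K2 : Nat} (h : K1 ≤ K2) : LenJ N K1 ≤ LenJ N K2 := by
  rcases Nat.lt_or_ge K1 K2 with h' | h'
  · exact le_of_lt (LenJ_strict_mono h')
  · have : K1 = K2 := le_antisymm h h'
    simp [this]

lemma reprN_of_lt {N x : Nat} (hN : 2 ≤ N) (h : x < N) : reprN N x = [dchar x] := by
  rcases Nat.eq_zero_or_pos x with h0 | h0
  · simp [reprN, h0]
  · have hx : x ≠ 0 := by omega
    rw [reprN, if_neg hx, Nat.digits_def' (by omega : 1 < N) h0,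
        Nat.mod_eq_of_lt h, Nat.div_eq_of_lt h]
    simp

lemma reprN_of_ge {N x : Nat} (hN : 2 ≤ N) (h : N ≤ x) :
    reprN N x = reprN N (x / N) ++ [dchar (x % N)] := by
  have hx : x ≠ 0 := by omega
  have hdiv : x / N ≠ 0 := by
    have := Nat.div_pos h (by omega : 0 < N); omega
  rw [reprN, if_neg hx, Nat.digits_def' (by omega : 1 < N) (by omega : 0 < x)]
  rw [reprN, if_neg hdiv]
  simp

lemma rlen_eq_of_mem_block {N d x : Nat} (hN : 2 ≤ N) (hd : 1 ≤ d)
    (h1 : N ^ (d - 1) ≤ x) (h2 : x < N ^ d) : rlen N x = d := by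
  have hx : x ≠ 0 := by
    have : 1 ≤ N ^ (d - 1) := Nat.one_le_pow _ _ (by omega)
    omega
  have hlog : Nat.log N x = d - 1 := by
    rw [Nat.log_eq_iff (Or.inr ⟨by omega, hx⟩)]
    refine ⟨h1, ?_⟩
    have hdd : d - 1 + 1 = d := by omega
    rw [hdd]; exact h2
  unfold rlen reprN
  rw [if_neg hx]
  simp [Nat.length_digits _ _ (by omega : 1 < N) hx, hlog]
  omega

lemma LenJ_le_N (N K : Nat) (hN : 2 ≤ N) (h : K ≤ N) : LenJ N K = K := by
  induction K with
  | zero => simp [LenJ, LJ]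
  | succ K ih =>
    rw [LenJ_succ, ih (by omega)]
    have h1 : rlen N K = 1 := by
      have h2 : reprN N K = [dchar K] := reprN_of_lt hN (by omega)
      simp [rlen, h2]
    omega

lemma LenJ_block_add {N d q : Nat} (hN : 2 ≤ N) (hd : 1 ≤ d)
    (hq : q ≤ N ^ d - N ^ (d - 1)) :
    LenJ N (N ^ (d - 1) + q) = LenJ N (N ^ (d - 1)) + q * d := by
  induction q with
  | zero => simp
  | succ q ih =>
    have hple : N ^ (d - 1) ≤ N ^ d := Nat.pow_le_pow_right (by omega) (by omega)
    rw [show N ^ (d - 1) + (q + 1) = (N ^ (d - 1) + q) + 1 from by omega,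
        LenJ_succ, ih (by omega)]
    have hr : rlen N (N ^ (d - 1) + q) = d :=
      rlen_eq_of_mem_block hN hd (by omega) (by omega)
    rw [hr, Nat.succ_mul]
    omega

lemma LJ_split {N K num : Nat} (h : num < K) :
    ∃ tail, LJ N K = LJ N num ++ (reprN N num ++ tail) := by
  induction K with
  | zero => omega
  | succ K ih =>
    rcases Nat.lt_succ_iff_lt_or_eq.mp h with h' | h'
    · rcases ih h' with ⟨tail, ht⟩
      exact ⟨tail ++ reprN N K, by rw [LJ_succ, ht]; simp⟩
    · subst h'
      exact ⟨[], by rw [LJ_succ]; simp⟩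

lemma LJ_getD {N K num j : Nat} (hnum : num < K) (hj : j < rlen N num) (c : Char) :
    (LJ N K).getD (LenJ N num + j) c = (reprN N num).getD j c := by
  rcases LJ_split hnum with ⟨tail, ht⟩
  rw [ht, List.getD_eq_getElem?_getD,
      List.getElem?_append_right (by unfold LenJ; omega)]
  have hidx : LenJ N num + j - (LJ N num).length = j := by unfold LenJ; omega
  rw [hidx, List.getElem?_append_left hj, ← List.getD_eq_getElem?_getD]

-- ---- bridging the ports' string helpers to the model ----

lemma numToChar_eq {x : Int} (hx : 0 ≤ x) :
    numToChar x = String.ofList [dchar x.toNat] := by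
  by_cases h9 : x ≤ 9
  · rw [numToChar, if_pos h9]
    interval_cases x <;> decide
  · rw [numToChar, if_neg h9]
    have h1 : (65 + (x - 10)).toNat = 55 + x.toNat := by omega
    have h2 : ¬ x.toNat ≤ 9 := by omega
    rw [h1]
    simp [dchar, h2]

lemma digitChar_eq_numToChar (x : Int) : digitChar x = numToChar x := rfl

lemma chars_join_nil (ls : List (List Char)) : PySem.Chars.join [] ls = ls.flatten := by
  induction ls with
  | nil => simp [PySem.Chars.join_nil]
  | cons a ls ih =>
    cases ls with
    | nil => simp [PySem.Chars.join_singleton]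
    | cons b ls' =>
      rw [PySem.Chars.join_cons_cons]
      simp only [List.flatten_cons] at ih ⊢
      rw [ih]
      simp

lemma strjoin_toList (ws : List String) :
    (PySem.Str.join "" ws).toList = (ws.map String.toList).flatten := by
  rw [PySem.Str.join, String.toList_ofList]
  have h : ("" : String).toList = [] := rfl
  rw [h, chars_join_nil]

lemma strjoin_singletons {α : Type} (g : α → Char) (l : List α) :
    PySem.Str.join "" (l.map (fun v => String.ofList [g v])) = String.ofList (l.map g) := by
  rw [PySem.Str.join]
  congr 1
  have h : ("" : String).toList = [] := rfl
  rw [h, List.map_map]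
  have h1 : (String.toList ∘ fun v => String.ofList [g v]) = fun v => [g v] := by
    funext v; simp [String.toList_ofList]
  rw [h1]
  have h2 := PySem.Chars.join_nil_singletons (l.map g)
  rw [List.map_map] at h2
  have h3 : ((fun c => [c]) ∘ g) = fun v => [g v] := rfl
  rw [h3] at h2
  exact h2

lemma decLoop_eq {n : Int} (hn : 2 ≤ n) :
    ∀ (fuel : Nat) (a : Int) (ret : List Int), 0 ≤ a → a.toNat < fuel →
    decLoop n fuel a ret = ret ++ (Nat.digits n.toNat a.toNat).map (fun v : Nat => (v : Int)) := by
  obtain ⟨N, rfl⟩ : ∃ N : Nat, n = (N : Int) := ⟨n.toNat, by omega⟩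
  have hN : 2 ≤ N := by exact_mod_cast hn
  intro fuel
  induction fuel with
  | zero => intro a ret _ h; omega
  | succ fuel ih =>
    intro a ret ha hfuel
    obtain ⟨A, rfl⟩ : ∃ A : Nat, a = (A : Int) := ⟨a.toNat, by omega⟩
    simp only [Int.toNat_natCast] at hfuel ⊢
    rw [decLoop]
    by_cases hpos : (0 : Int) < (A : Int)
    · rw [if_pos hpos]
      have hA : 0 < A := by exact_mod_cast hpos
      rw [PySem.Int.floordiv_natCast, PySem.Int.mod_natCast]
      have hlt : A / N < fuel := by
        have := Nat.div_lt_self hA (by omega : 1 < N)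
        omega
      rw [ih ((A / N : Nat) : Int) _ (by positivity)
        (by simp only [Int.toNat_natCast]; exact hlt)]
      rw [Nat.digits_def' (by omega : 1 < N) hA]
      simp only [Int.toNat_natCast, List.map_cons, List.append_assoc, List.singleton_append]
    · rw [if_neg hpos]
      have hA : A = 0 := by omega
      subst hA
      simp

lemma map_numToChar_cast (l : List Nat) :
    (l.map (fun v : Nat => (v : Int))).map numToChar = l.map (fun v => String.ofList [dchar v]) := by
  induction l with
  | nil => rfl
  | cons a l ih =>
    simp only [List.map_cons, ih]
    rw [numToChar_eq (by positivity : (0:Int) ≤ ((a : Nat) : Int)), Int.toNat_natCast]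

lemma decToString_eq {n dec : Int} (hn : 2 ≤ n) (hdec : 0 ≤ dec) :
    decToString dec n = String.ofList (reprN n.toNat dec.toNat) := by
  by_cases h0 : dec = 0
  · subst h0
    rw [decToString, if_pos rfl]
    rw [show (0 : Int).toNat = 0 from rfl, reprN, if_pos rfl]
    decide
  · have hpos : 0 < dec := by omega
    rw [decToString, if_neg h0, decLoop_eq hn _ _ _ hdec (by omega)]
    rw [List.nil_append, ← List.map_reverse, map_numToChar_cast,
        strjoin_singletons dchar ((Nat.digits n.toNat dec.toNat).reverse),
        reprN, if_neg (by omega : dec.toNat ≠ 0)]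

lemma reprRec_eq {n : Int} (hn : 2 ≤ n) :
    ∀ (fuel : Nat) (x : Int), 0 ≤ x → x.toNat < fuel →
    reprRec n fuel x = String.ofList (reprN n.toNat x.toNat) := by
  obtain ⟨N, rfl⟩ : ∃ N : Nat, n = (N : Int) := ⟨n.toNat, by omega⟩
  have hN : 2 ≤ N := by exact_mod_cast hn
  intro fuel
  induction fuel with
  | zero => intro x _ h; omega
  | succ fuel ih =>
    intro x hx hfuel
    obtain ⟨X, rfl⟩ : ∃ X : Nat, x = (X : Int) := ⟨x.toNat, by omega⟩
    simp only [Int.toNat_natCast] at hfuel ⊢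
    rw [reprRec]
    by_cases hlt : (X : Int) < (N : Int)
    · rw [if_pos hlt, digitChar_eq_numToChar,
          numToChar_eq (by positivity : (0:Int) ≤ (X : Int)), Int.toNat_natCast,
          reprN_of_lt hN (by exact_mod_cast hlt)]
    · rw [if_neg hlt]
      have hXN : N ≤ X := by exact_mod_cast not_lt.mp hlt
      have hX0 : 0 < X := by omega
      rw [PySem.Int.floordiv_natCast, PySem.Int.mod_natCast]
      have hdlt : X / N < fuel := by
        have := Nat.div_lt_self hX0 (by omega : 1 < N)
        omega
      rw [ih ((X / N : Nat) : Int) (by positivity)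
        (by simp only [Int.toNat_natCast]; exact hdlt)]
      rw [digitChar_eq_numToChar, numToChar_eq (by positivity : (0:Int) ≤ ((X % N : Nat) : Int)), Int.toNat_natCast]
      rw [← String.ofList_append]
      congr 1
      exact (reprN_of_ge hN hXN).symm

-- ---- port A's build loop produces exactly a stream prefix of length ≥ t*m ----

lemma buildLoop_spec {n t m : Int} (hn : 2 ≤ n) :
    ∀ (fuel : Nat) (num cc : Int) (words : List String), 0 ≤ num →
      cc = (LenJ n.toNat num.toNat : Int) → (t * m - cc).toNat < fuel →
    ∃ K : Nat, num.toNat ≤ K ∧ t * m ≤ (LenJ n.toNat K : Int) ∧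
      (PySem.Str.join "" (buildLoop n t m fuel cc num words)).toList
        = (PySem.Str.join "" words).toList ++ (List.range' num.toNat (K - num.toNat)).flatMap (reprN n.toNat) := by
  intro fuel
  induction fuel with
  | zero => intro num cc words _ _ h; omega
  | succ fuel ih =>
    intro num cc words hnum hcc hfuel
    rw [buildLoop]
    by_cases hlt : cc < t * m
    · rw [if_pos hlt]
      have hdec := decToString_eq (dec := num) hn hnum
      have hlen : PySem.Str.len (decToString num n) = (rlen n.toNat num.toNat : Int) := by
        rw [hdec, PySem.Str.len_eq, String.toList_ofList]
        rfl
      have hrp := rlen_pos n.toNat num.toNat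
      have hcc' : cc + PySem.Str.len (decToString num n)
          = (LenJ n.toNat (num + 1).toNat : Int) := by
        rw [hlen, hcc, show (num + 1).toNat = num.toNat + 1 from by omega, LenJ_succ]
        push_cast
        ring
      have hlen1 : (1 : Int) ≤ PySem.Str.len (decToString num n) := by
        rw [hlen]; exact_mod_cast hrp
      obtain ⟨K, hK1, hK2, hK3⟩ := ih (num + 1) (cc + PySem.Str.len (decToString num n))
        (words ++ [decToString num n]) (by omega) hcc' (by omega)
      refine ⟨K, by omega, hK2, ?_⟩
      rw [hK3]
      have hws : (PySem.Str.join "" (words ++ [decToString num n])).toList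
          = (PySem.Str.join "" words).toList ++ reprN n.toNat num.toNat := by
        rw [strjoin_toList, strjoin_toList]
        simp [hdec, String.toList_ofList]
      rw [hws, List.append_assoc]
      congr 1
      have h1 : (num + 1).toNat = num.toNat + 1 := by omega
      rw [h1] at hK1
      have h2 : K - num.toNat = (K - (num.toNat + 1)) + 1 := by omega
      rw [h1, h2, List.range'_succ]
      simp
    · rw [if_neg hlt]
      refine ⟨num.toNat, le_refl _, by omega, ?_⟩
      simp

-- ---- port A's scan loop = "take t of the positions ≡ p-1 (mod m)" ----

def natPicks (M r : Nat) : List Char → Nat → List Char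
  | [], _ => []
  | c :: rest, i => if i % M = r then c :: natPicks M r rest (i + 1) else natPicks M r rest (i + 1)

lemma scanLoop_eq {t m p : Int} (hm : 1 ≤ m) (hp : 1 ≤ p) :
    ∀ (s : List Char) (i cnt : Int) (acc : List Char), 0 ≤ i → 0 ≤ cnt → cnt ≤ t →
    scanLoop t m p s i cnt acc
      = acc ++ (natPicks m.toNat (p - 1).toNat s i.toNat).take (t - cnt).toNat := by
  obtain ⟨M, rfl⟩ : ∃ M : Nat, m = (M : Int) := ⟨m.toNat, by omega⟩
  obtain ⟨R, hR⟩ : ∃ R : Nat, p - 1 = (R : Int) := ⟨(p - 1).toNat, by omega⟩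
  have hRt : (p - 1).toNat = R := by omega
  intro s
  induction s with
  | nil => intro i cnt acc _ _ _; simp [scanLoop, natPicks]
  | cons c rest ih =>
    intro i cnt acc hi hcnt hct
    obtain ⟨I, rfl⟩ : ∃ I : Nat, i = (I : Int) := ⟨i.toNat, by omega⟩
    rw [scanLoop]
    by_cases heq : cnt = t
    · rw [if_pos heq]
      subst heq
      simp
    · rw [if_neg heq]
      rw [PySem.Int.mod_natCast]
      simp only [Int.toNat_natCast, hRt]
      by_cases hpick : I % M = R
      · rw [if_pos (by rw [hpick, hR])]
        rw [ih ((I : Int) + 1) (cnt + 1) (acc ++ [c]) (by positivity) (by omega) (by omega)]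
        rw [show ((I : Int) + 1).toNat = I + 1 from by omega,
            show (t - cnt).toNat = (t - (cnt + 1)).toNat + 1 from by omega]
        simp [natPicks, hpick, hRt]
      · rw [if_neg (by rw [hR]; exact_mod_cast hpick)]
        rw [ih ((I : Int) + 1) cnt acc (by positivity) hcnt hct]
        rw [show ((I : Int) + 1).toNat = I + 1 from by omega]
        simp [natPicks, hpick, hRt]

-- when p-1 is not a residue modulo m the scan never picks anything
lemma scanLoop_none {t m p : Int} (hm : 1 ≤ m) (hp : p - 1 < 0 ∨ m ≤ p - 1) :
    ∀ (s : List Char) (i cnt : Int) (acc : List Char), 0 ≤ i →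
    scanLoop t m p s i cnt acc = acc := by
  intro s
  induction s with
  | nil => intro i cnt acc _; rfl
  | cons c rest ih =>
    intro i cnt acc hi
    rw [scanLoop]
    have h1 : 0 ≤ PySem.Int.mod i m := PySem.Int.mod_nonneg i (show (0 : Int) < m from by omega)
    have h2 : PySem.Int.mod i m < m := PySem.Int.mod_lt i (show (0 : Int) < m from by omega)
    by_cases heq : cnt = t
    · rw [if_pos heq]
    · rw [if_neg heq, if_neg (by omega), ih (i + 1) cnt acc (by omega)]

lemma natPicks_append (M r : Nat) (a b : List Char) (i : Nat) :
    natPicks M r (a ++ b) i = natPicks M r a i ++ natPicks M r b (i + a.length) := by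
  induction a generalizing i with
  | nil => simp [natPicks]
  | cons c a ih =>
    simp only [List.cons_append, natPicks, List.length_cons]
    by_cases h : i % M = r
    · rw [if_pos h, if_pos h, ih (i + 1), List.cons_append,
          show i + (a.length + 1) = (i + 1) + a.length from by omega]
    · rw [if_neg h, if_neg h, ih (i + 1),
          show i + (a.length + 1) = (i + 1) + a.length from by omega]

lemma natPicks_shift (M r : Nat) (s : List Char) (i : Nat) :
    natPicks M r s (i + M) = natPicks M r s i := by
  induction s generalizing i with
  | nil => rfl
  | cons c rest ih =>
    simp only [natPicks, Nat.add_mod_right]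
    rw [show i + M + 1 = (i + 1) + M from by omega, ih (i + 1)]

lemma natPicks_none {M r : Nat} : ∀ (s : List Char) (i : Nat), r < i → i + s.length ≤ M →
    natPicks M r s i = [] := by
  intro s
  induction s with
  | nil => intro i _ _; rfl
  | cons c rest ih =>
    intro i hr hlen
    simp only [List.length_cons] at hlen
    have hi : i % M = i := Nat.mod_eq_of_lt (by omega)
    simp only [natPicks, hi]
    rw [if_neg (by omega : ¬ i = r), ih (i + 1) (by omega) (by omega)]

lemma natPicks_one {M r : Nat} : ∀ (s : List Char) (i : Nat), i ≤ r → r < i + s.length →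
    i + s.length ≤ M → natPicks M r s i = [s.getD (r - i) default] := by
  intro s
  induction s with
  | nil => intro i h1 h2 _; simp at h2; omega
  | cons c rest ih =>
    intro i h1 h2 h3
    simp only [List.length_cons] at h2 h3
    have hi : i % M = i := Nat.mod_eq_of_lt (by omega)
    simp only [natPicks, hi]
    by_cases he : i = r
    · subst he
      rw [if_pos rfl, natPicks_none rest (i + 1) (by omega) (by omega)]
      simp
    · rw [if_neg he, ih (i + 1) (by omega) (by omega) (by omega)]
      rw [show r - i = (r - (i + 1)) + 1 from by omega]
      simp

lemma natPicks_take {M r : Nat} (hr : r < M) :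
    ∀ (T : Nat) (s : List Char), M * T ≤ s.length →
    (natPicks M r s 0).take T = (List.range T).map (fun k => s.getD (r + k * M) default) := by
  intro T
  induction T with
  | zero => intro s _; simp
  | succ T ih =>
    intro s hlen
    have hmul : M * (T + 1) = M * T + M := by ring
    have hM : M ≤ s.length := by omega
    have hlt : (List.take M s).length = M := by
      simp [List.length_take]
      omega
    have h1 : natPicks M r (List.take M s) 0 = [(List.take M s).getD r default] := by
      have := natPicks_one (M := M) (r := r) (List.take M s) 0 (by omega)
        (by rw [hlt]; omega) (by rw [hlt]; omega)
      simpa using this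
    conv_lhs => rw [← List.take_append_drop M s, natPicks_append, hlt, natPicks_shift]
    rw [h1, List.singleton_append, List.take_succ_cons,
        ih (List.drop M s) (by simp [List.length_drop]; omega)]
    rw [List.range_succ_eq_map, List.map_cons, List.map_map]
    congr 1
    · rw [List.getD_eq_getElem?_getD, List.getD_eq_getElem?_getD,
          List.getElem?_take_of_lt hr,
          show r + 0 * M = r from by ring]
    · apply List.map_congr_left
      intro k _
      simp only [Function.comp_apply, Nat.succ_eq_add_one]
      rw [List.getD_eq_getElem?_getD, List.getD_eq_getElem?_getD, List.getElem?_drop,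
          show M + (r + k * M) = r + (k + 1) * M from by ring]

-- ---- port B's skip loop: the digit-count invariant ----

lemma skipLoop_spec {n : Int} (hn : 2 ≤ n) :
    ∀ (fuel : Nat) (pos d : Int), 0 ≤ pos → 2 ≤ d → pos.toNat < fuel →
    ∃ (pos' d' : Int),
      skipLoop n fuel pos d ((n ^ d.toNat - n ^ (d.toNat - 1)) * d) = (pos', d', (n ^ d'.toNat - n ^ (d'.toNat - 1)) * d') ∧
      0 ≤ pos' ∧ 2 ≤ d' ∧ pos' < (n ^ d'.toNat - n ^ (d'.toNat - 1)) * d' ∧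
      LenJ n.toNat (n.toNat ^ (d'.toNat - 1)) + pos'.toNat
        = LenJ n.toNat (n.toNat ^ (d.toNat - 1)) + pos.toNat := by
  obtain ⟨N, rfl⟩ : ∃ N : Nat, n = (N : Int) := ⟨n.toNat, by omega⟩
  have hN : 2 ≤ N := by exact_mod_cast hn
  intro fuel
  induction fuel with
  | zero => intro pos d h1 _ h3; omega
  | succ fuel ih =>
    intro pos d hpos hd hfuel
    obtain ⟨P, rfl⟩ : ∃ P : Nat, pos = (P : Int) := ⟨pos.toNat, by omega⟩
    obtain ⟨D, rfl⟩ : ∃ D : Nat, d = (D : Int) := ⟨d.toNat, by omega⟩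
    have hD : 2 ≤ D := by exact_mod_cast hd
    simp only [Int.toNat_natCast] at hfuel ⊢
    have hple : N ^ (D - 1) ≤ N ^ D := Nat.pow_le_pow_right (by omega) (by omega)
    have hplt : N ^ (D - 1) < N ^ D := Nat.pow_lt_pow_right (by omega) (by omega)
    have hblock : ((N : Int) ^ D - (N : Int) ^ (D - 1)) * (D : Int)
        = (((N ^ D - N ^ (D - 1)) * D : Nat) : Int) := by
      push_cast [hple]
      ring
    rw [skipLoop]
    by_cases hble : ((N : Int) ^ D - (N : Int) ^ (D - 1)) * (D : Int) ≤ (P : Int)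
    · rw [if_pos hble]
      rw [hblock] at hble
      have hbP : (N ^ D - N ^ (D - 1)) * D ≤ P := by exact_mod_cast hble
      have hb1 : 1 ≤ (N ^ D - N ^ (D - 1)) * D := by
        have h11 : 1 ≤ N ^ D - N ^ (D - 1) := by omega
        calc 1 = 1 * 1 := by ring
        _ ≤ (N ^ D - N ^ (D - 1)) * D := Nat.mul_le_mul h11 (by omega)
      have hsub : (P : Int) - ((N : Int) ^ D - (N : Int) ^ (D - 1)) * (D : Int)
          = ((P - (N ^ D - N ^ (D - 1)) * D : Nat) : Int) := by
        rw [hblock]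
        omega
      have hDD : ((D : Int) + 1) = (((D + 1) : Nat) : Int) := by push_cast; ring
      rw [hsub, hDD]
      obtain ⟨pos', d', hsk, h1, h2, h3, h4⟩ :=
        ih ((P - (N ^ D - N ^ (D - 1)) * D : Nat) : Int) (((D + 1) : Nat) : Int)
          (by positivity) (by exact_mod_cast (by omega : 2 ≤ D + 1))
          (by simp only [Int.toNat_natCast]; omega)
      simp only [Int.toNat_natCast] at hsk h4
      refine ⟨pos', d', hsk, h1, by omega, h3, ?_⟩
      rw [h4]
      have hbl := LenJ_block_add (N := N) (d := D) (q := N ^ D - N ^ (D - 1)) hN (by omega) (le_refl _)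
      rw [show N ^ (D - 1) + (N ^ D - N ^ (D - 1)) = N ^ D from by omega] at hbl
      rw [show D + 1 - 1 = D from by omega]
      omega
    · rw [if_neg hble]
      exact ⟨(P : Int), (D : Int), rfl, by positivity, hd, not_le.mp hble, rfl⟩

-- ---- port B's locate reads exactly the stream character ----

lemma locate_eq {n : Int} (hn : 2 ≤ n) (pos0 : Int) (K : Nat)
    (h0 : 0 ≤ pos0) (hK : pos0.toNat < LenJ n.toNat K) :
    locate n pos0 = String.ofList [(LJ n.toNat K).getD pos0.toNat default] := by
  obtain ⟨N, rfl⟩ : ∃ N : Nat, n = (N : Int) := ⟨n.toNat, by omega⟩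
  obtain ⟨P, rfl⟩ : ∃ P : Nat, pos0 = (P : Int) := ⟨pos0.toNat, by omega⟩
  have hN : 2 ≤ N := by exact_mod_cast hn
  simp only [Int.toNat_natCast] at hK ⊢
  rw [locate]
  by_cases hlt : (P : Int) < (N : Int)
  · rw [if_pos hlt]
    have hPN : P < N := by exact_mod_cast hlt
    have hnum : P < K := by
      by_contra hc
      have hm := LenJ_mono (N := N) (not_lt.mp hc)
      rw [LenJ_le_N N P hN (by omega)] at hm
      omega
    have hget := LJ_getD (N := N) (K := K) (num := P) (j := 0) hnum (rlen_pos N P) default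
    rw [Nat.add_zero, LenJ_le_N N P hN (by omega)] at hget
    rw [reprN_of_lt hN hPN] at hget
    simp only [List.getD_cons_zero] at hget
    rw [digitChar_eq_numToChar, numToChar_eq (by positivity : (0:Int) ≤ (P : Int)), Int.toNat_natCast, hget]
  · rw [if_neg hlt]
    have hNP : N ≤ P := by exact_mod_cast not_lt.mp hlt
    have hsub : (P : Int) - (N : Int) = ((P - N : Nat) : Int) := by omega
    have hb : ((N : Int) * N - N) * 2
        = ((N : Int) ^ (2 : Int).toNat - (N : Int) ^ ((2 : Int).toNat - 1)) * 2 := by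
      rw [show ((2 : Int)).toNat = 2 from rfl]
      ring
    rw [hsub, hb]
    obtain ⟨pos', d', hsk, hp1, hp2, hp3, hp4⟩ :=
      skipLoop_spec (n := (N : Int)) hn ((((P - N : Nat) : Int)).toNat + 1)
        ((P - N : Nat) : Int) 2 (by positivity) (by norm_num) (by omega)
    rw [hsk]
    obtain ⟨P', rfl⟩ : ∃ P' : Nat, pos' = (P' : Int) := ⟨pos'.toNat, by omega⟩
    obtain ⟨D', rfl⟩ : ∃ D' : Nat, d' = (D' : Int) := ⟨d'.toNat, by omega⟩
    have hD' : 2 ≤ D' := by exact_mod_cast hp2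
    simp only [Int.toNat_natCast, show ((2 : Int)).toNat = 2 from rfl] at hp3 hp4 ⊢
    have hple : N ^ (D' - 1) ≤ N ^ D' := Nat.pow_le_pow_right (by omega) (by omega)
    have hblock : ((N : Int) ^ D' - (N : Int) ^ (D' - 1)) * (D' : Int)
        = (((N ^ D' - N ^ (D' - 1)) * D' : Nat) : Int) := by
      push_cast [hple]
      ring
    rw [hblock] at hp3
    have hp3' : P' < (N ^ D' - N ^ (D' - 1)) * D' := by exact_mod_cast hp3
    obtain ⟨q, off, hq, hoff⟩ : ∃ q off : Nat, q = P' / D' ∧ off = P' % D' := ⟨_, _, rfl, rfl⟩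
    have hqlt : q < N ^ D' - N ^ (D' - 1) := by
      rw [hq]
      exact Nat.div_lt_of_lt_mul (by rw [Nat.mul_comm]; exact hp3')
    have hofflt : off < D' := by
      rw [hoff]
      exact Nat.mod_lt _ (by omega)
    have hdm : q * D' + off = P' := by
      rw [hq, hoff, Nat.mul_comm]
      exact Nat.div_add_mod P' D'
    have hnumlt : N ^ (D' - 1) + q < N ^ D' := by omega
    have hrlen : rlen N (N ^ (D' - 1) + q) = D' :=
      rlen_eq_of_mem_block hN (by omega) (by omega) hnumlt
    have hbl := LenJ_block_add (N := N) (d := D') (q := q) hN (by omega) (by omega)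
    have hN1 : LenJ N (N ^ (2 - 1)) = N := by
      rw [show (2 : Nat) - 1 = 1 from rfl, pow_one]
      exact LenJ_le_N N N hN (le_refl _)
    have hp4' : LenJ N (N ^ (D' - 1)) + P' = N + (P - N) := by
      rw [hN1] at hp4
      omega
    have hPsum : LenJ N (N ^ (D' - 1) + q) + off = P := by
      rw [hbl]
      omega
    have hnumK : N ^ (D' - 1) + q < K := by
      by_contra hc
      have hm2 := LenJ_mono (N := N) (not_lt.mp hc)
      omega
    have hfd : PySem.Int.floordiv (P' : Int) (D' : Int) = ((q : Nat) : Int) := by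
      rw [PySem.Int.floordiv_natCast, hq]
    have hmd : PySem.Int.mod (P' : Int) (D' : Int) = ((off : Nat) : Int) := by
      rw [PySem.Int.mod_natCast, hoff]
    rw [hfd, hmd]
    have hnumc : (N : Int) ^ (D' - 1) + ((q : Nat) : Int) = ((N ^ (D' - 1) + q : Nat) : Int) := by
      push_cast
      ring
    rw [hnumc]
    simp only [Int.toNat_natCast]
    rw [reprRec_eq (n := (N : Int)) hn (N ^ (D' - 1) + q + 1) ((N ^ (D' - 1) + q : Nat) : Int)
      (by positivity) (by simp)]
    simp only [Int.toNat_natCast]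
    rw [PySem.Str.pyGet?_natCast, String.toList_ofList]
    have hofflen : off < (reprN N (N ^ (D' - 1) + q)).length := by
      have hrr : (reprN N (N ^ (D' - 1) + q)).length = rlen N (N ^ (D' - 1) + q) := rfl
      rw [hrr, hrlen]
      exact hofflt
    rw [List.getElem?_eq_getElem hofflen]
    have hfin := LJ_getD (N := N) (K := K) (num := N ^ (D' - 1) + q) (j := off)
      hnumK (by rw [hrlen]; exact hofflt) default
    rw [hPsum] at hfin
    rw [hfin, List.getD_eq_getElem _ _ hofflen]

-- ===== VERDICT (by name: the statement is the Claim_ definition above) =====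
theorem solution_spec : Claim_equal_solution := by
  unfold Claim_equal_solution
  intro n t m p _ hpre
  unfold Spec_solution
  by_cases htm : t * m ≤ 0
  · -- the built string is empty, so A returns ""; so does B
    have h0 : (t * m).toNat = 0 := by omega
    simp only [solution, h0, buildLoop, if_neg (show ¬ (0 : Int) < t * m from by omega)]
    rw [show (PySem.Str.join "" ([] : List String)).toList = [] from by
      rw [strjoin_toList]; rfl]
    rw [show scanLoop t m p [] 0 0 [] = [] from rfl]
    by_cases ht : t ≤ 0
    · simp only [solution_alt, PySem.List.pyRange_one_eq_nil ht, List.map_nil]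
      by_cases hg : 1 ≤ p ∧ p ≤ m
      · rw [if_pos hg, PySem.Str.join]
        rfl
      · rw [if_neg hg]
    · have hm0 : m ≤ 0 := by
        by_contra hx
        have h1m : 1 ≤ m := by omega
        have := le_mul_of_one_le_right (show (0 : Int) ≤ t from by omega) h1m
        omega
      have hg : ¬ (1 ≤ p ∧ p ≤ m) := by omega
      simp only [solution_alt, if_neg hg]
  · -- the stream really gets built: Pre_ gives 2 ≤ n and 1 ≤ m, and t > 0
    obtain ⟨hn, hm⟩ : 2 ≤ n ∧ 1 ≤ m := by
      rcases hpre with h | h | h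
      · exact absurd (mul_nonpos_of_nonpos_of_nonneg h.1 h.2) htm
      · exact absurd (mul_nonpos_of_nonneg_of_nonpos h.1 h.2) htm
      · exact ⟨h.1, h.2.1⟩
    have htpos : 0 < t := by
      by_contra hx
      exact htm (mul_nonpos_of_nonpos_of_nonneg (by omega) (by omega))
    by_cases hg : 1 ≤ p ∧ p ≤ m
    · obtain ⟨hp, hpm⟩ := hg
      obtain ⟨T, rfl⟩ : ∃ T : Nat, t = (T : Int) := ⟨t.toNat, by omega⟩
      obtain ⟨M, rfl⟩ : ∃ M : Nat, m = (M : Int) := ⟨m.toNat, by omega⟩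
      obtain ⟨R, hR⟩ : ∃ R : Nat, p - 1 = (R : Int) := ⟨(p - 1).toNat, by omega⟩
      have hT1 : 1 ≤ T := by exact_mod_cast htpos
      have hM1 : 1 ≤ M := by exact_mod_cast hm
      have hRM : R < M := by omega
      -- A side: the scanned string is a stream prefix of length ≥ T*M
      obtain ⟨K, hK0, hKlen, hKjoin⟩ := buildLoop_spec (t := (T : Int)) (m := (M : Int)) hn
        (((T : Int) * (M : Int)).toNat + 1) 0 0 [] le_rfl (by simp [LenJ, LJ]) (by omega)
      simp only [Int.toNat_zero, Nat.sub_zero] at hKjoin hK0 hKlen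
      rw [strjoin_toList ([] : List String)] at hKjoin
      simp only [List.map_nil, List.flatten_nil, List.nil_append] at hKjoin
      rw [← List.range_eq_range'] at hKjoin
      have hLJ : (List.range K).flatMap (reprN n.toNat) = LJ n.toNat K := rfl
      rw [hLJ] at hKjoin
      have hTMle : T * M ≤ LenJ n.toNat K := by
        have h2 : ((T * M : Nat) : Int) ≤ ((LenJ n.toNat K : Nat) : Int) := by
          push_cast
          linarith
        exact_mod_cast h2
      have hlenLJ : M * T ≤ (LJ n.toNat K).length := by
        have hl : (LJ n.toNat K).length = LenJ n.toNat K := rfl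
        rw [hl, Nat.mul_comm]
        exact hTMle
      have hpt : ((p : Int) - 1).toNat = R := by omega
      simp only [solution, solution_alt,
        if_pos (show (1 : Int) ≤ p ∧ p ≤ (M : Int) from ⟨hp, hpm⟩)]
      rw [hKjoin, scanLoop_eq (by exact_mod_cast hM1) hp (LJ n.toNat K) 0 0 [] le_rfl le_rfl
        (by positivity)]
      simp only [Int.toNat_zero, Int.sub_zero, List.nil_append, Int.toNat_natCast, hpt]
      rw [natPicks_take hRM T (LJ n.toNat K) hlenLJ]
      -- B side: each query reads the same stream character
      rw [PySem.List.pyRange_one 0 (T : Int), hR]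
      simp only [Int.sub_zero, Int.toNat_natCast, List.map_map]
      have hmapeq : (List.range T).map
            ((fun k => locate n ((R : Int) + k * (M : Int))) ∘ fun k : Nat => 0 + (k : Int))
          = (List.range T).map (fun k : Nat => String.ofList [(LJ n.toNat K).getD (R + k * M) default]) := by
        apply List.map_congr_left
        intro k hk
        have hkT : k < T := List.mem_range.mp hk
        simp only [Function.comp_apply]
        have harg : (R : Int) + (0 + (k : Int)) * (M : Int) = ((R + k * M : Nat) : Int) := by
          push_cast
          ring
        rw [harg]
        have h1 : k * M ≤ (T - 1) * M := Nat.mul_le_mul_right M (by omega)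
        have h2 : (T - 1 + 1) * M = (T - 1) * M + M := Nat.succ_mul _ _
        rw [show T - 1 + 1 = T from by omega] at h2
        have hbound : R + k * M < LenJ n.toNat K := by omega
        rw [locate_eq hn ((R + k * M : Nat) : Int) K (by positivity) (by simpa using hbound)]
        simp only [Int.toNat_natCast]
      rw [hmapeq, strjoin_singletons (fun k : Nat => (LJ n.toNat K).getD (R + k * M) default)
        (List.range T)]
    · -- p outside [1, m]: the scan never matches and B's guard returns ""
      have hpcase : p - 1 < 0 ∨ m ≤ p - 1 := by omega
      simp only [solution, solution_alt, if_neg hg]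
      rw [scanLoop_none hm hpcase _ 0 0 [] le_rfl]
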